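-- pv_equiv track=rewrite | github.com/WanxiaJaneYang/dndKnowledgeBot | scripts/retrieval/query_normalization.py | _tokenize_with_protected_phrases
-- ===== SOURCE A (Python) =====
-- def _tokenize_with_protected_phrases(text: str, protected_phrases: list[str]) -> list[str]:
--     words = text.split()
--     if not words:
--         return []
--
--     protected_word_lists = [
--         phrase.split() for phrase in sorted(protected_phrases, key=lambda item: len(item.split()), reverse=True)
--     ]
--
--     tokens: list[str] = []
--     index = 0
--     while index < len(words):
--         matched_phrase = None
--         for phrase_words in protected_word_lists:
--             end_index = index + len(phrase_words)
--             if words[index:end_index] == phrase_words: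
--                 matched_phrase = " ".join(phrase_words)
--                 index = end_index
--                 break
--
--         if matched_phrase is not None:
--             tokens.append(matched_phrase)
--             continue
--
--         tokens.append(words[index])
--         index += 1
--
--     return tokens
-- ===== SOURCE B (Python) =====
-- def _tokenize_with_protected_phrases(text: str, protected_phrases: list[str]) -> list[str]:
--     words = text.split()
--     if not words:
--         return []
--
--     # Staged algorithm: instead of scanning the phrase list at every text
--     # position while walking, first PRECOMPUTE a match table by iterating
--     # phrase-outer (longest-first, stable): best[i] holds the first phrase
--     # (in that priority order) matching at word position i.  Then a simple
--     # second pass emits tokens by jumping through the table.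
--     n = len(words)
--     best: list[list[str] | None] = [None] * n
--     for phrase in sorted(protected_phrases, key=lambda item: len(item.split()), reverse=True):
--         pw = phrase.split()
--         L = len(pw)
--         if not L:
--             continue
--         for i in range(n - L + 1):
--             if best[i] is None and words[i:i + L] == pw:
--                 best[i] = pw
--
--     tokens: list[str] = []
--     i = 0
--     while i < n:
--         pw = best[i]
--         if pw is None:
--             tokens.append(words[i])
--             i += 1
--         else:
--             tokens.append(" ".join(pw))
--             i += len(pw)
--     return tokens
-- ===== Notes on version B (the rewrite author's own statement) =====
-- stated objective: alternative
-- what changed: B inverts the loop nesting into two staged passes: it first precomputes a match table best[i] (first phrase in longest-first order matching at each word position) by iterating phrase-outer over all positions, then a second pass emits tokens by jumping through the table, instead of A's walk that rescans the whole phrase list at every position reached.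
-- outside the precondition, e.g. on _tokenize_with_protected_phrases('a', ['a', '']): A returns ['a'], B returns ['a']
import Mathlib
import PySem

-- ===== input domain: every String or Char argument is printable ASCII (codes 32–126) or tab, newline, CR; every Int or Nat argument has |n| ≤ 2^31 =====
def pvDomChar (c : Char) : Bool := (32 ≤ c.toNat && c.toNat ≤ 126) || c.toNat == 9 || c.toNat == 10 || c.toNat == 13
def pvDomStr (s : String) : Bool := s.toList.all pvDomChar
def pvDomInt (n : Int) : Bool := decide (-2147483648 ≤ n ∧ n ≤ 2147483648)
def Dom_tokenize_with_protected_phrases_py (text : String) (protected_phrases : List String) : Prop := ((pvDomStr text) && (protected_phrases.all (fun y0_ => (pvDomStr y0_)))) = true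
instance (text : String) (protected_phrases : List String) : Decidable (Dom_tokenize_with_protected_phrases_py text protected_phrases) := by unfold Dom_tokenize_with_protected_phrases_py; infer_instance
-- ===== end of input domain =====

-- B replaces A's walk (which rescans the sorted phrase list at every position reached)
-- by two staged passes: a phrase-outer precomputed match table, then an emission pass
-- (alternative decomposition); return values are equal on Pre_.

-- ===== PORT A =====
-- inner 'for phrase_words in protected_word_lists: … break' loop of A
def pvFindA (words : List String) (index : Nat) : List (List String) → Option (String × Nat)
  | [] => none
  | pw :: rest =>
      let endIndex := index + pw.length
      if PySem.List.slice words (some (index : Int)) (some ((index : Int) + (pw.length : Int))) = pw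
      then some (PySem.Str.join " " pw, endIndex)
      else pvFindA words index rest

-- A's 'while index < len(words)' loop; fuel is only a totality guard (one unit per
-- iteration; words.length suffices under Pre_, where every iteration consumes ≥ 1 word)
def pvLoopA (words : List String) (plists : List (List String)) : Nat → Nat → List String → List String
  | 0, _, tokens => tokens
  | fuel + 1, index, tokens =>
      if index < words.length then
        match pvFindA words index plists with
        | some (tok, newIndex) => pvLoopA words plists fuel newIndex (tokens ++ [tok])
        | none => pvLoopA words plists fuel (index + 1) (tokens ++ [words.getD index ""])
      else tokens

def tokenize_with_protected_phrases_py (text : String) (protected_phrases : List String) : List String :=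
  let words := PySem.Str.split₀ text
  if words = [] then []
  else
    let protected_word_lists :=
      (PySem.List.sorted protected_phrases (fun item => (PySem.Str.split₀ item).length) true).map
        PySem.Str.split₀
    pvLoopA words protected_word_lists words.length 0 []

-- ===== PORT B =====
-- B's inner 'for i in range(n - L + 1): if best[i] is None and words[i:i+L] == pw: best[i] = pw'
-- (indices produced by range are nonnegative Nats: range(n-L+1) = List.range (n+1-L) for L ≥ 1,
-- which is the only case this is called in; best[i] read/write as getD/set on in-range Nat indices)
def pvMarkPhrase (words : List String) (pw : List String)
    (best : List (Option (List String))) : List (Option (List String)) :=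
  (List.range (words.length + 1 - pw.length)).foldl
    (fun b i =>
      if b.getD i none = none ∧ (words.drop i).take pw.length = pw
      then b.set i (some pw) else b) best

-- B's phrase-outer table-building loop over the sorted phrase list
def pvBuildBest (words : List String) (sortedPhrases : List String) : List (Option (List String)) :=
  sortedPhrases.foldl
    (fun best phrase =>
      let pw := PySem.Str.split₀ phrase
      if pw.length = 0 then best else pvMarkPhrase words pw best)
    (List.replicate words.length none)

-- B's emission 'while i < n' loop; fuel is a totality guard only
def pvEmit (words : List String) (best : List (Option (List String))) : Nat → Nat → List String
  | 0, _ => []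
  | fuel + 1, i =>
      if i < words.length then
        match best.getD i none with
        | none => words.getD i "" :: pvEmit words best fuel (i + 1)
        | some pw => PySem.Str.join " " pw :: pvEmit words best fuel (i + pw.length)
      else []

def tokenize_with_protected_phrases_py_alt (text : String) (protected_phrases : List String) : List String :=
  let words := PySem.Str.split₀ text
  if words = [] then []
  else
    let best := pvBuildBest words
      (PySem.List.sorted protected_phrases (fun item => (PySem.Str.split₀ item).length) true)
    pvEmit words best words.length 0

-- ===== PRECONDITION & SPEC =====
-- Pre_ excludes phrase lists containing an empty/whitespace-only phrase when the text has
-- words: such a phrase matches at any position without advancing the index, so A loops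
-- forever as soon as it is reached (e.g. text "a b", phrases [""]); on the remaining such
-- inputs (every position covered by a nonempty phrase first) A happens to return and agrees with B.
def Pre_tokenize_with_protected_phrases_py (text : String) (protected_phrases : List String) : Prop :=
  PySem.Str.split₀ text ≠ [] → ∀ p ∈ protected_phrases, PySem.Str.split₀ p ≠ []
instance (text : String) (protected_phrases : List String) : Decidable (Pre_tokenize_with_protected_phrases_py text protected_phrases) := by unfold Pre_tokenize_with_protected_phrases_py; infer_instance
def pvWitness_tokenize_with_protected_phrases_py : String × List String := ("new york is a big city", ["new york", "big city"])

def Spec_tokenize_with_protected_phrases_py (text : String) (protected_phrases : List String) (out : List String) : Prop := out = tokenize_with_protected_phrases_py_alt text protected_phrases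
instance (text : String) (protected_phrases : List String) (out : List String) : Decidable (Spec_tokenize_with_protected_phrases_py text protected_phrases out) := by unfold Spec_tokenize_with_protected_phrases_py; infer_instance

-- ===== CLAIM (what is proved, stated in full; the proofs are below) =====
def Claim_equal_tokenize_with_protected_phrases_py : Prop := ∀ (text : String) (protected_phrases : List String), Dom_tokenize_with_protected_phrases_py text protected_phrases → Pre_tokenize_with_protected_phrases_py text protected_phrases → Spec_tokenize_with_protected_phrases_py text protected_phrases (tokenize_with_protected_phrases_py text protected_phrases)

-- ===== LEMMAS AND PROOFS =====

-- the first phrase word list (in priority order) matching the word list at position i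
def pvFirstMatch (words : List String) (i : Nat) : List (List String) → Option (List String)
  | [] => none
  | pw :: rest =>
      if (words.drop i).take pw.length = pw then some pw else pvFirstMatch words i rest

theorem pvFirstMatch_append (words : List String) (i : Nat) (l1 l2 : List (List String)) :
    pvFirstMatch words i (l1 ++ l2)
      = match pvFirstMatch words i l1 with
        | some q => some q
        | none => pvFirstMatch words i l2 := by
  induction l1 with
  | nil => simp [pvFirstMatch]
  | cons pw rest ih =>
      simp only [List.cons_append, pvFirstMatch]
      split_ifs <;> simp [ih]

-- A's inner loop finds exactly the first match, paired with the join and jump target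
theorem pvFindA_eq (words : List String) (i : Nat) (cands : List (List String)) :
    pvFindA words i cands
      = (pvFirstMatch words i cands).map (fun pw => (PySem.Str.join " " pw, i + pw.length)) := by
  induction cands with
  | nil => simp [pvFindA, pvFirstMatch]
  | cons pw rest ih =>
      have hslice : PySem.List.slice words (some (i : Int)) (some ((i : Int) + (pw.length : Int)))
          = (words.drop i).take pw.length := by
        simpa using PySem.List.slice_natCast_add words i pw.length
      simp only [pvFindA, pvFirstMatch, hslice]
      split_ifs <;> simp [ih]

-- a match at position j needs j + |pw| ≤ |words| (for nonempty pw it lands inside the range)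
theorem pvMatch_bound (words : List String) (j : Nat) (pw : List String) (hpw : pw ≠ [])
    (h : (words.drop j).take pw.length = pw) : j + pw.length ≤ words.length := by
  have hL : 1 ≤ pw.length := by
    cases pw with | nil => exact absurd rfl hpw | cons _ _ => simp
  have h1 : ((words.drop j).take pw.length).length = pw.length := by rw [h]
  rw [List.length_take, List.length_drop] at h1
  omega

-- pointwise effect of the inner marking fold over an arbitrary index list
theorem pvGetD_set_self (b : List (Option (List String))) (j : Nat)
    (v : Option (List String)) (h : j < b.length) : (b.set j v).getD j none = v := by
  simp [List.getD, h]

theorem pvGetD_set_ne (b : List (Option (List String))) (k j : Nat)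
    (v : Option (List String)) (h : k ≠ j) : (b.set k v).getD j none = b.getD j none := by
  simp [List.getD, h]

theorem pvMarkFold_getD (words : List String) (pw : List String) :
    ∀ (is : List Nat) (b : List (Option (List String))), (∀ k ∈ is, k < b.length) → ∀ j : Nat,
      ((is.foldl (fun b i =>
          if b.getD i none = none ∧ (words.drop i).take pw.length = pw
          then b.set i (some pw) else b) b).getD j none)
        = if j ∈ is ∧ b.getD j none = none ∧ (words.drop j).take pw.length = pw
          then some pw else b.getD j none := by
  intro is
  induction is with
  | nil => intro b _ j; simp
  | cons k rest ih =>
      intro b hlen j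
      have hk : k < b.length := hlen k (by simp)
      simp only [List.foldl_cons]
      by_cases hc : b.getD k none = none ∧ (words.drop k).take pw.length = pw
      · rw [if_pos hc,
          ih _ (by intro m hm; simpa using hlen m (List.mem_cons_of_mem _ hm)) j]
        by_cases hjk : j = k
        · subst hjk
          rw [pvGetD_set_self b j (some pw) hk]
          have h1 : b[j]?.getD none = none := hc.1
          simp [h1, hc.2]
        · rw [pvGetD_set_ne b k j (some pw) (fun h => hjk h.symm)]
          simp [List.mem_cons, hjk]
      · rw [if_neg hc, ih b (fun m hm => hlen m (List.mem_cons_of_mem _ hm)) j]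
        by_cases hjk : j = k
        · subst hjk
          have h1 : ¬ (b[j]?.getD none = none ∧ (words.drop j).take pw.length = pw) := hc
          simp [h1]
        · simp [List.mem_cons, hjk]

-- marking preserves the table length
theorem pvMarkPhrase_length (words : List String) (pw : List String)
    (b : List (Option (List String))) : (pvMarkPhrase words pw b).length = b.length := by
  unfold pvMarkPhrase
  induction List.range (words.length + 1 - pw.length) generalizing b with
  | nil => rfl
  | cons k rest ih =>
      simp only [List.foldl_cons]
      split_ifs with h
      · rw [ih, List.length_set]
      · exact ih b

-- marking one phrase updates the table exactly as appending it to the priority list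
theorem pvMarkPhrase_getD (words : List String) (pw : List String) (hpw : pw ≠ [])
    (b : List (Option (List String))) (hb : b.length = words.length)
    (acc : List (List String)) (hacc : ∀ j : Nat, b.getD j none = pvFirstMatch words j acc) :
    ∀ j : Nat, (pvMarkPhrase words pw b).getD j none = pvFirstMatch words j (acc ++ [pw]) := by
  intro j
  have hL : 1 ≤ pw.length := by
    cases pw with | nil => exact absurd rfl hpw | cons _ _ => simp
  have hlen : ∀ k ∈ List.range (words.length + 1 - pw.length), k < b.length := by
    intro k hk; rw [hb]; have := List.mem_range.mp hk; omega
  unfold pvMarkPhrase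
  rw [pvMarkFold_getD words pw _ b hlen j, pvFirstMatch_append, hacc j]
  by_cases hm : (words.drop j).take pw.length = pw
  · have hjr : j ∈ List.range (words.length + 1 - pw.length) := by
      have := pvMatch_bound words j pw hpw hm
      exact List.mem_range.mpr (by omega)
    cases hfm : pvFirstMatch words j acc with
    | none => simp [hjr, hm, pvFirstMatch]
    | some q => simp
  · cases hfm : pvFirstMatch words j acc with
    | none => simp [hm, pvFirstMatch]
    | some q => simp

-- the whole table-building fold computes pvFirstMatch over the mapped phrase list
theorem pvBuildBest_getD (words : List String) :
    ∀ (l : List String) (b : List (Option (List String))) (acc : List (List String)),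
      (∀ p ∈ l, PySem.Str.split₀ p ≠ []) → b.length = words.length →
      (∀ j : Nat, b.getD j none = pvFirstMatch words j acc) →
      (∀ j : Nat,
        (l.foldl (fun best phrase =>
            let pw := PySem.Str.split₀ phrase
            if pw.length = 0 then best else pvMarkPhrase words pw best) b).getD j none
          = pvFirstMatch words j (acc ++ l.map PySem.Str.split₀)) := by
  intro l
  induction l with
  | nil => intro b acc _ _ hacc j; simpa using hacc j
  | cons p rest ih =>
      intro b acc hne hb hacc j
      have hp : PySem.Str.split₀ p ≠ [] := hne p (by simp)
      have hL : ¬ (PySem.Str.split₀ p).length = 0 := by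
        simpa [List.length_eq_zero_iff] using hp
      simp only [List.foldl_cons, if_neg hL]
      have hb' : (pvMarkPhrase words (PySem.Str.split₀ p) b).length = words.length := by
        rw [pvMarkPhrase_length, hb]
      have hacc' := pvMarkPhrase_getD words (PySem.Str.split₀ p) hp b hb acc hacc
      have := ih (pvMarkPhrase words (PySem.Str.split₀ p) b)
        (acc ++ [PySem.Str.split₀ p]) (fun q hq => hne q (by simp [hq])) hb' hacc' j
      simpa [List.append_assoc] using this

-- A's walk equals B's emission pass over a table that encodes pvFirstMatch
theorem pvLoop_eq (words : List String) (plists : List (List String))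
    (best : List (Option (List String)))
    (hb : ∀ j : Nat, best.getD j none = pvFirstMatch words j plists) :
    ∀ (fuel i : Nat) (tokens : List String),
      pvLoopA words plists fuel i tokens = tokens ++ pvEmit words best fuel i := by
  intro fuel
  induction fuel with
  | zero => intro i tokens; simp [pvLoopA, pvEmit]
  | succ fuel ih =>
      intro i tokens
      simp only [pvLoopA, pvEmit]
      by_cases hi : i < words.length
      · simp only [hi, if_pos]
        rw [pvFindA_eq words i plists, hb i]
        cases pvFirstMatch words i plists with
        | none => simp [ih]
        | some pw => simp [ih]
      · simp [hi]

-- ===== VERDICT (by name: the statement is the Claim_ definition above) =====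
theorem tokenize_with_protected_phrases_py_spec : Claim_equal_tokenize_with_protected_phrases_py := by
  intro text pps _ hpre
  unfold Spec_tokenize_with_protected_phrases_py
  unfold tokenize_with_protected_phrases_py tokenize_with_protected_phrases_py_alt
  by_cases hw : PySem.Str.split₀ text = []
  · simp [hw]
  · simp only [hw, ite_false]
    set words := PySem.Str.split₀ text with hwords
    set sortedPh := PySem.List.sorted pps (fun item => (PySem.Str.split₀ item).length) true with hs
    have hne : ∀ p ∈ sortedPh, PySem.Str.split₀ p ≠ [] := by
      intro p hp
      exact hpre hw p ((PySem.List.mem_sorted pps _ true p).mp hp)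
    have hb : ∀ j : Nat, (pvBuildBest words sortedPh).getD j none
        = pvFirstMatch words j (sortedPh.map PySem.Str.split₀) := by
      intro j
      have := pvBuildBest_getD words sortedPh (List.replicate words.length none) [] hne
        (by simp) (by intro j; simp [pvFirstMatch]) j
      simpa [pvBuildBest] using this
    rw [pvLoop_eq words (sortedPh.map PySem.Str.split₀) (pvBuildBest words sortedPh) hb]
    simp
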